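-- pv_equiv track=rewrite | github.com/lilPlumberBoy/SubagentWorkforce | company_orchestrator/monitoring.py | summarize_objective_statuses
-- ===== SOURCE A (Python) =====
-- from typing import Any, Callable, TypeVar
--
-- def summarize_objective_statuses(objective_id: str, activities: list[dict[str, Any]]) -> str:
--     objective_activities = [activity for activity in activities if activity["objective_id"] == objective_id]
--     if not objective_activities:
--         return "no activity"
--     counts: dict[str, int] = {}
--     for activity in objective_activities:
--         counts[activity["status"]] = counts.get(activity["status"], 0) + 1
--     return ", ".join(f"{status}:{count}" for status, count in sorted(counts.items()))
-- ===== SOURCE B (Python) =====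
-- def summarize_objective_statuses(objective_id: str, activities: list) -> str:
--     statuses = sorted(
--         activity["status"]
--         for activity in activities
--         if activity["objective_id"] == objective_id
--     )
--     if not statuses:
--         return "no activity"
--     parts = []
--     current, run = statuses[0], 1
--     for status in statuses[1:]:
--         if status == current:
--             run += 1
--         else:
--             parts.append(f"{current}:{run}")
--             current, run = status, 1
--     parts.append(f"{current}:{run}")
--     return ", ".join(parts)
-- ===== Notes on version B (the rewrite author's own statement) =====
-- stated objective: alternative
-- what changed: Replaces A's hash-map counting followed by sorting the (status, count) items with a dict-free sort-then-scan: B sorts the matching statuses and emits one 'status:run-length' part per maximal run in a single linear pass.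
import Mathlib
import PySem

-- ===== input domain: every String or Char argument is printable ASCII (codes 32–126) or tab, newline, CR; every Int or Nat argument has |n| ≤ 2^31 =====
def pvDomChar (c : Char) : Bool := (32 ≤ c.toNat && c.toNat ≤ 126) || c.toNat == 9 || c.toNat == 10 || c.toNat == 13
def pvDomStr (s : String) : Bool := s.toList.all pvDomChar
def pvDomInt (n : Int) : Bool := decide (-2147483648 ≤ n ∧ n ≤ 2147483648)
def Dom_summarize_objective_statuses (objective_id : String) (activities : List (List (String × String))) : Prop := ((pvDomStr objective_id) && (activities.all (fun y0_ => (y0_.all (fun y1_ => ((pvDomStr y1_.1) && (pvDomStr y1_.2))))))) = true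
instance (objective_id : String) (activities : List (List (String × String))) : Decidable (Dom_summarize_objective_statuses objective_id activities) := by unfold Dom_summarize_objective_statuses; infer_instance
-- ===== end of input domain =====

-- B replaces A's hash-map counting followed by sorting the (status, count) items with a dict-free
-- sort-then-scan (sort the matching statuses, emit one "status:run-length" part per maximal run):
-- an alternative algorithm of the same cost class.

-- ===== PORT A =====
-- activity["…"]: a missing key is a KeyError in Python; Pre_ excludes those inputs, so the
-- `.getD ""` / `== some _` totalizers below are never reached on admitted inputs.
def summarize_objective_statuses (objective_id : String) (activities : List (List (String × String))) : String :=
  let objective_activities := activities.filter (fun a => ((PySem.Dict.mk a).get? "objective_id") == some objective_id)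
  if objective_activities = [] then "no activity"
  else
    let counts : PySem.Dict String Int :=
      objective_activities.foldl
        (fun d a => d.insert (((PySem.Dict.mk a).get? "status").getD "")
                             ((d.getD (((PySem.Dict.mk a).get? "status").getD "") 0) + 1))
        PySem.Dict.empty
    PySem.Str.join ", "
      ((PySem.List.sorted2 counts.items (fun p => p.1) (fun p => p.2) false).map
        (fun p => p.1 ++ ":" ++ PySem.Int.toStr p.2))

-- ===== PORT B =====
-- the run-length scan of Source B: `parts` accumulated over statuses[1:] with (current, run) state,
-- the final part appended after the loop
def pvRunParts (current : String) (run : Int) : List String → List String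
  | [] => [current ++ ":" ++ PySem.Int.toStr run]
  | status :: rest =>
      if status = current then pvRunParts current (run + 1) rest
      else (current ++ ":" ++ PySem.Int.toStr run) :: pvRunParts status 1 rest

def summarize_objective_statuses_alt (objective_id : String) (activities : List (List (String × String))) : String :=
  let statuses :=
    PySem.List.sorted
      ((activities.filter (fun a => ((PySem.Dict.mk a).get? "objective_id") == some objective_id)).map
        (fun a => ((PySem.Dict.mk a).get? "status").getD ""))
      (fun s => s) false
  match statuses with
  | [] => "no activity"
  | s0 :: rest => PySem.Str.join ", " (pvRunParts s0 1 rest)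

-- ===== PRECONDITION & SPEC =====
-- Pre_ excludes exactly the inputs on which Python A raises KeyError: an activity without an
-- "objective_id" key, or a matching activity without a "status" key.
def Pre_summarize_objective_statuses (objective_id : String) (activities : List (List (String × String))) : Prop :=
  ∀ a ∈ activities, (PySem.Dict.mk a).contains "objective_id" = true ∧
    ((PySem.Dict.mk a).get? "objective_id" = some objective_id → (PySem.Dict.mk a).contains "status" = true)
instance (objective_id : String) (activities : List (List (String × String))) : Decidable (Pre_summarize_objective_statuses objective_id activities) := by unfold Pre_summarize_objective_statuses; infer_instance

def pvWitness_summarize_objective_statuses : String × (List (List (String × String))) :=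
  ("o1", [[("objective_id", "o1"), ("status", "done")], [("objective_id", "o2")]])

def Spec_summarize_objective_statuses (objective_id : String) (activities : List (List (String × String))) (out : String) : Prop := out = summarize_objective_statuses_alt objective_id activities
instance (objective_id : String) (activities : List (List (String × String))) (out : String) : Decidable (Spec_summarize_objective_statuses objective_id activities out) := by unfold Spec_summarize_objective_statuses; infer_instance

-- ===== CLAIM (what is proved, stated in full; the proofs are below) =====
def Claim_equal_summarize_objective_statuses : Prop := ∀ (objective_id : String) (activities : List (List (String × String))), Dom_summarize_objective_statuses objective_id activities → Pre_summarize_objective_statuses objective_id activities → Spec_summarize_objective_statuses objective_id activities (summarize_objective_statuses objective_id activities)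

-- ===== LEMMAS AND PROOFS =====

-- run-length groups of a list as (value, run length) pairs — proof-side mirror of pvRunParts
def pvGRAux (cur : String) (n : Int) : List String → List (String × Int)
  | [] => [(cur, n)]
  | s :: rest => if s = cur then pvGRAux cur (n + 1) rest else (cur, n) :: pvGRAux s 1 rest

def pvGR : List String → List (String × Int)
  | [] => []
  | x :: xs => pvGRAux x 1 xs

lemma pvRunParts_eq_map (rest : List String) : ∀ (cur : String) (n : Int),
    pvRunParts cur n rest = (pvGRAux cur n rest).map (fun p => p.1 ++ ":" ++ PySem.Int.toStr p.2) := by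
  induction rest with
  | nil => intro cur n; simp [pvRunParts, pvGRAux]
  | cons s rest ih =>
      intro cur n
      by_cases h : s = cur <;> simp [pvRunParts, pvGRAux, h, ih]

-- the aux scan peels off the leading run of `cur`
lemma pvGRAux_spec : ∀ (rest : List String) (cur : String) (n : Int),
    rest.Pairwise (· ≤ ·) → (∀ y ∈ rest, cur ≤ y) →
    pvGRAux cur n rest = (cur, n + (rest.count cur : Int)) :: pvGR (rest.filter (fun y => decide (y ≠ cur))) := by
  intro rest
  induction rest with
  | nil => intro cur n _ _; simp [pvGRAux, pvGR]
  | cons y ys ih =>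
      intro cur n hp hle
      by_cases h : y = cur
      · subst h
        have h1 : pvGRAux y n (y :: ys) = pvGRAux y (n + 1) ys := by simp [pvGRAux]
        rw [h1, ih y (n + 1) hp.tail (fun z hz => List.rel_of_pairwise_cons hp hz)]
        have hc : ((y :: ys).count y : Int) = (ys.count y : Int) + 1 := by
          rw [List.count_cons_self]; push_cast; ring
        have hf : (y :: ys).filter (fun z => decide (z ≠ y)) = ys.filter (fun z => decide (z ≠ y)) := by
          simp
        rw [hc, hf]; ring_nf
      · have hcur_lt : cur < y := lt_of_le_of_ne (hle y (by simp)) (fun he => h he.symm)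
        have hne : ∀ z ∈ y :: ys, z ≠ cur := by
          intro z hz he
          subst he
          rcases List.mem_cons.mp hz with h' | hz'
          · exact h h'.symm
          · exact absurd (lt_of_lt_of_le hcur_lt (List.rel_of_pairwise_cons hp hz')) (lt_irrefl z)
        have hc : (y :: ys).count cur = 0 :=
          List.count_eq_zero.mpr (fun hmem => hne cur hmem rfl)
        have hf : (y :: ys).filter (fun z => decide (z ≠ cur)) = y :: ys :=
          List.filter_eq_self.mpr (fun z hz => decide_eq_true (hne z hz))
        have h2 : pvGRAux cur n (y :: ys) = (cur, n) :: pvGRAux y 1 ys := by simp [pvGRAux, h]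
        rw [h2, hc, hf]
        simp [pvGR]

-- characterization of the run-length groups of a sorted list
lemma pvGR_char : ∀ (n : Nat) (S : List String), S.length ≤ n → S.Pairwise (· ≤ ·) →
    (pvGR S).Pairwise (fun a b => a.1 < b.1) ∧
    (∀ p ∈ pvGR S, p.1 ∈ S ∧ p.2 = (S.count p.1 : Int)) ∧
    (∀ s ∈ S, (s, (S.count s : Int)) ∈ pvGR S) := by
  intro n
  induction n with
  | zero =>
      intro S hlen _
      have : S = [] := List.eq_nil_of_length_eq_zero (Nat.le_zero.mp hlen)
      subst this
      simp [pvGR]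
  | succ n ih =>
      intro S hlen hp
      cases S with
      | nil => simp [pvGR]
      | cons x xs =>
          obtain ⟨hx, hxs⟩ := List.pairwise_cons.mp hp
          have hGR : pvGR (x :: xs) = (x, 1 + (xs.count x : Int)) :: pvGR (xs.filter (fun y => decide (y ≠ x))) := by
            simp only [pvGR]
            exact pvGRAux_spec xs x 1 hxs hx
          have hFp : (xs.filter (fun y => decide (y ≠ x))).Pairwise (· ≤ ·) := hxs.filter _
          have hFlen : (xs.filter (fun y => decide (y ≠ x))).length ≤ n :=
            le_trans (List.length_filter_le _ _) (Nat.le_of_succ_le_succ hlen)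
          have hFx : ∀ y ∈ xs.filter (fun y => decide (y ≠ x)), x < y := by
            intro y hy
            obtain ⟨hmem, hd⟩ := List.mem_filter.mp hy
            have hney : y ≠ x := of_decide_eq_true hd
            exact lt_of_le_of_ne (hx y hmem) (fun he => hney he.symm)
          obtain ⟨ih1, ih2, ih3⟩ := ih _ hFlen hFp
          have hcx : ((x :: xs).count x : Int) = 1 + (xs.count x : Int) := by
            rw [List.count_cons_self]; push_cast; ring
          have hcF : ∀ s : String, s ≠ x → ((x :: xs).count s : Int) = ((xs.filter (fun y => decide (y ≠ x))).count s : Int) := by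
            intro s hs
            have e1 : (x :: xs).count s = xs.count s := by simp [List.count_cons, Ne.symm hs]
            have e2 : (xs.filter (fun y => decide (y ≠ x))).count s = xs.count s :=
              List.count_filter (by simp [hs])
            rw [e1, e2]
          refine ⟨?_, ?_, ?_⟩
          · rw [hGR]
            refine List.pairwise_cons.mpr ⟨?_, ih1⟩
            intro p hpmem
            have h1 := (ih2 p hpmem).1
            exact hFx p.1 h1
          · rw [hGR]
            intro p hpmem
            rcases List.mem_cons.mp hpmem with rfl | hpt
            · exact ⟨by simp, by rw [hcx]⟩
            · obtain ⟨hmem, hval⟩ := ih2 p hpt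
              obtain ⟨hmem', hd⟩ := List.mem_filter.mp hmem
              have hne : p.1 ≠ x := of_decide_eq_true hd
              exact ⟨List.mem_cons_of_mem x hmem', by rw [hcF p.1 hne, hval]⟩
          · rw [hGR]
            intro s hs
            by_cases hsx : s = x
            · subst hsx
              rw [hcx]
              simp
            · have hs' : s ∈ xs := by
                rcases List.mem_cons.mp hs with rfl | h'
                · exact absurd rfl hsx
                · exact h'
              have hsF : s ∈ xs.filter (fun y => decide (y ≠ x)) :=
                List.mem_filter.mpr ⟨hs', decide_eq_true hsx⟩
              have := ih3 s hsF
              rw [hcF s hsx]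
              exact List.mem_cons_of_mem _ this

-- insertion with pointwise-agreeing comparators
lemma pvInsertBy_congr {α : Type} (b1 b2 : α → α → Bool) (x : α) :
    ∀ ys : List α, (∀ y ∈ ys, b1 x y = b2 x y) →
    PySem.List.insertBy b1 x ys = PySem.List.insertBy b2 x ys := by
  intro ys
  induction ys with
  | nil => intro _; rfl
  | cons y ys ih =>
      intro hag
      have hy := hag y (by simp)
      by_cases hb : b2 x y = true
      · simp [PySem.List.insertBy, hy, hb]
      · have hb1 : b1 x y = false := by rw [hy]; exact eq_false_of_ne_true hb
        have hb2 : b2 x y = false := eq_false_of_ne_true hb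
        simp [PySem.List.insertBy, hb1, hb2]
        exact ih (fun z hz => hag z (by simp [hz]))

lemma pvFoldl_insertBy_congr {α : Type} (b1 b2 : α → α → Bool) :
    ∀ (xs acc : List α), (∀ x ∈ xs, ∀ y ∈ acc, b1 x y = b2 x y) →
    (∀ x ∈ xs, ∀ y ∈ xs, b1 x y = b2 x y) →
    xs.foldl (fun acc x => PySem.List.insertBy b1 x acc) acc =
    xs.foldl (fun acc x => PySem.List.insertBy b2 x acc) acc := by
  intro xs
  induction xs with
  | nil => intro acc _ _; rfl
  | cons x xs ih =>
      intro acc h1 h2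
      simp only [List.foldl_cons]
      rw [pvInsertBy_congr b1 b2 x acc (h1 x (by simp))]
      refine ih _ ?_ ?_
      · intro x' hx' y hy
        rcases (PySem.List.mem_insertBy b2 x y acc).mp hy with rfl | hy'
        · exact h2 x' (by simp [hx']) y (by simp)
        · exact h1 x' (by simp [hx']) y hy'
      · intro x' hx' y hy
        exact h2 x' (by simp [hx']) y (by simp [hy])

-- on a list with pairwise-distinct first components, Python's tuple sort is the sort by first component
lemma pvSorted2_eq_sorted_fst (l : List (String × Int)) (hnd : (l.map Prod.fst).Nodup) :
    PySem.List.sorted2 l (fun p => p.1) (fun p => p.2) false =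
    PySem.List.sorted l (fun p => p.1) := by
  rw [PySem.List.sorted_eq_foldl_insertBy]
  show l.foldl (fun acc x => PySem.List.insertBy _ x acc) [] = _
  refine pvFoldl_insertBy_congr _ _ l [] (by intro _ _ y hy; cases hy) ?_
  intro a ha b hb
  rcases lt_trichotomy a.1 b.1 with hlt | heq | hgt
  · simp [hlt]
  · have hab : a = b := List.inj_on_of_nodup_map hnd ha hb heq
    subst hab
    simp
  · simp [hgt, not_lt_of_gt hgt]

-- membership in the items of Counter(L)
lemma pvMem_counter_items (L : List String) (p : String × Int) :
    p ∈ (PySem.Dict.counter L).items ↔ p.1 ∈ L ∧ p.2 = (L.count p.1 : Int) := by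
  rw [PySem.Dict.items_eq_map_keys _ (PySem.Dict.nodup_keys_counter L) 0]
  rw [PySem.Dict.keys_counter]
  constructor
  · intro hmem
    obtain ⟨k, hk, hkp⟩ := List.mem_map.mp hmem
    rw [PySem.Dict.getD_counter] at hkp
    subst hkp
    exact ⟨(PySem.Set.mem_ofList L k).mp hk, rfl⟩
  · rintro ⟨h1, h2⟩
    refine List.mem_map.mpr ⟨p.1, (PySem.Set.mem_ofList L p.1).mpr h1, ?_⟩
    rw [PySem.Dict.getD_counter]
    exact Prod.ext rfl h2.symm

-- ===== VERDICT (by name: the statement is the Claim_ definition above) =====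
theorem summarize_objective_statuses_spec : Claim_equal_summarize_objective_statuses := by
  intro objective_id activities _ _
  unfold Spec_summarize_objective_statuses
  by_cases hO : activities.filter (fun a => ((PySem.Dict.mk a).get? "objective_id") == some objective_id) = []
  · unfold summarize_objective_statuses summarize_objective_statuses_alt
    rw [hO]
    rfl
  · have hL : (activities.filter (fun a => ((PySem.Dict.mk a).get? "objective_id") == some objective_id)).map
        (fun a => ((PySem.Dict.mk a).get? "status").getD "") ≠ [] :=
      fun h => hO (List.map_eq_nil_iff.mp h)
    -- abbreviations (plain terms, repeated in full below)
    -- A side: the counting loop is Counter(statuses)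
    have hcnt : (activities.filter (fun a => ((PySem.Dict.mk a).get? "objective_id") == some objective_id)).foldl
        (fun d a => d.insert (((PySem.Dict.mk a).get? "status").getD "")
                             ((d.getD (((PySem.Dict.mk a).get? "status").getD "") 0) + 1))
        PySem.Dict.empty
        = PySem.Dict.counter ((activities.filter (fun a => ((PySem.Dict.mk a).get? "objective_id") == some objective_id)).map
            (fun a => ((PySem.Dict.mk a).get? "status").getD "")) := by
      rw [PySem.Dict.counter_eq_foldl, List.foldl_map]
      rfl
    have hA : summarize_objective_statuses objective_id activities =
        PySem.Str.join ", "
          ((PySem.List.sorted2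
              (PySem.Dict.counter ((activities.filter (fun a => ((PySem.Dict.mk a).get? "objective_id") == some objective_id)).map
                (fun a => ((PySem.Dict.mk a).get? "status").getD ""))).items
              (fun p => p.1) (fun p => p.2) false).map
            (fun p => p.1 ++ ":" ++ PySem.Int.toStr p.2)) := by
      unfold summarize_objective_statuses
      rw [if_neg hO, hcnt]
    -- B side: the match yields the run-length parts of the sorted statuses
    have hAlt : summarize_objective_statuses_alt objective_id activities =
        PySem.Str.join ", "
          ((pvGR (PySem.List.sorted
              ((activities.filter (fun a => ((PySem.Dict.mk a).get? "objective_id") == some objective_id)).map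
                (fun a => ((PySem.Dict.mk a).get? "status").getD ""))
              (fun s => s) false)).map
            (fun p => p.1 ++ ":" ++ PySem.Int.toStr p.2)) := by
      unfold summarize_objective_statuses_alt
      cases hSc : PySem.List.sorted
          ((activities.filter (fun a => ((PySem.Dict.mk a).get? "objective_id") == some objective_id)).map
            (fun a => ((PySem.Dict.mk a).get? "status").getD ""))
          (fun s => s) false with
      | nil => exact absurd ((PySem.List.sorted_eq_nil_iff _ _ _).mp hSc) hL
      | cons s0 rest =>
          show PySem.Str.join ", " (pvRunParts s0 1 rest) = _
          rw [pvRunParts_eq_map rest s0 1]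
          rfl
    rw [hA, hAlt]
    -- it remains to show the sorted items are exactly the run-length groups
    have hSp : (PySem.List.sorted
        ((activities.filter (fun a => ((PySem.Dict.mk a).get? "objective_id") == some objective_id)).map
          (fun a => ((PySem.Dict.mk a).get? "status").getD ""))
        (fun s => s) false).Pairwise (· ≤ ·) := PySem.List.sorted_pairwise _ (fun s => s)
    obtain ⟨hc1, hc2, hc3⟩ := pvGR_char _ _ le_rfl hSp
    have hndk : (((PySem.Dict.counter ((activities.filter (fun a => ((PySem.Dict.mk a).get? "objective_id") == some objective_id)).map
        (fun a => ((PySem.Dict.mk a).get? "status").getD ""))).items).map Prod.fst).Nodup :=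
      PySem.Dict.nodup_keys_counter _
    rw [pvSorted2_eq_sorted_fst _ hndk]
    apply congrArg
    apply congrArg
    refine PySem.List.sorted_eq_of_perm_of_pairwise_lt _ _ (fun p : String × Int => p.1) ?_ hc1
    have hndG : (pvGR (PySem.List.sorted
        ((activities.filter (fun a => ((PySem.Dict.mk a).get? "objective_id") == some objective_id)).map
          (fun a => ((PySem.Dict.mk a).get? "status").getD ""))
        (fun s => s) false)).Nodup := by
      have hpw := List.pairwise_map.mpr hc1
      exact (List.Nodup.of_map Prod.fst) (hpw.imp (fun h => ne_of_lt h))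
    have hndI : ((PySem.Dict.counter ((activities.filter (fun a => ((PySem.Dict.mk a).get? "objective_id") == some objective_id)).map
        (fun a => ((PySem.Dict.mk a).get? "status").getD ""))).items).Nodup :=
      List.Nodup.of_map Prod.fst hndk
    refine (List.perm_ext_iff_of_nodup hndG hndI).mpr ?_
    intro p
    have hcount : ∀ s : String, (PySem.List.sorted
        ((activities.filter (fun a => ((PySem.Dict.mk a).get? "objective_id") == some objective_id)).map
          (fun a => ((PySem.Dict.mk a).get? "status").getD ""))
        (fun s => s) false).count s =
        ((activities.filter (fun a => ((PySem.Dict.mk a).get? "objective_id") == some objective_id)).map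
          (fun a => ((PySem.Dict.mk a).get? "status").getD "")).count s :=
      fun s => (PySem.List.sorted_perm _ (fun s => s) false).count_eq s
    rw [pvMem_counter_items _ p]
    constructor
    · intro hp
      obtain ⟨hmem, hval⟩ := hc2 p hp
      exact ⟨(PySem.List.mem_sorted _ _ false p.1).mp hmem, by rw [hval, hcount]⟩
    · rintro ⟨h1, h2⟩
      have hmemS := (PySem.List.mem_sorted _ (fun s => s) false p.1).mpr h1
      have hm := hc3 p.1 hmemS
      have hpe : p = (p.1, ((PySem.List.sorted
          ((activities.filter (fun a => ((PySem.Dict.mk a).get? "objective_id") == some objective_id)).map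
            (fun a => ((PySem.Dict.mk a).get? "status").getD ""))
          (fun s => s) false).count p.1 : Int)) := Prod.ext rfl (by rw [h2, hcount])
      rw [hpe]
      exact hm
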